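-- pv_equiv track=rewrite | github.com/trminhit/Bao_Cao_Ca_Nhan_8Rooks | algorithms/AndOr_8Rooks.py | nondet_successors
-- ===== SOURCE A (Python) =====
-- def nondet_successors(state, n):
--     """
--     Sinh các kết quả có thể xảy ra khi thực hiện hành động PlaceRook.
--     """
--     row = len(state)
--     results = []
--     valid_cols = [c for c in range(n) if c not in state]
--     for col in valid_cols:
--         succ = []
--         # Kết quả 1: Thành công
--         succ.append(state + [col])
--         # Kết quả 2: Thất bại (đặt trượt vào các cột trống khác)
--         other_cols = [c for c in valid_cols if c != col]
--         for pushed in other_cols: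
--             succ.append(state + [pushed])
--         results.append((col, succ))
--     return results
-- ===== SOURCE B (Python) =====
-- def nondet_successors(state, n):
--     cells = [state + [c] for c in range(n) if c not in state]
--
--     def go(before, after):
--         if not after:
--             return []
--         focus, rest = after[0], after[1:]
--         return [(focus[-1], [focus] + before + rest)] + go(before + [focus], rest)
--
--     return go([], cells)
-- ===== Notes on version B (the rewrite author's own statement) =====
-- stated objective: alternative
-- what changed: B builds the placement table once, recovers each column from its placement's last element, and produces the successor blocks by a recursive zipper (before-accumulator) over that table, eliminating A's nested loop that re-filters valid_cols and rebuilds state+[pushed] for every column.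
import Mathlib
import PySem

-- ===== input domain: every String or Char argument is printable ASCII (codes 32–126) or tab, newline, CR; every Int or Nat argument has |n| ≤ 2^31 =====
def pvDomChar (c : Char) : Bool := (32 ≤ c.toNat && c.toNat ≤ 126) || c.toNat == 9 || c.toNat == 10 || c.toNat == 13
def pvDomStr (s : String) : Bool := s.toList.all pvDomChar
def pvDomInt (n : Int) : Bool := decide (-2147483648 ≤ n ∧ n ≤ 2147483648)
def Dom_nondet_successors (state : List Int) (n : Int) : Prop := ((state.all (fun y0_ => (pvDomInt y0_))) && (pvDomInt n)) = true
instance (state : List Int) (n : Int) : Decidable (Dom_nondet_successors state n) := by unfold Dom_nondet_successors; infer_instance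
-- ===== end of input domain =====

-- B builds the placement table once and emits each block by a recursive zipper over it, recovering the column from the placement's last element; alternative decomposition, same output.

-- ===== PORT A =====
def nondet_successors (state : List Int) (n : Int) : List (Int × List (List Int)) :=
  let valid_cols := (PySem.List.pyRange 0 n 1).filter (fun c => !(state.contains c))
  valid_cols.foldl (fun results col =>
    let succ : List (List Int) := []
    let succ := succ ++ [state ++ [col]]
    let other_cols := valid_cols.filter (fun c => !(c == col))
    let succ := other_cols.foldl (fun s pushed => s ++ [state ++ [pushed]]) succ
    results ++ [(col, succ)]) []

-- ===== PORT B =====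
-- go's 'after[0]/after[1:]' on a nonempty list are exactly head/tail (the pattern match);
-- focus[-1] is PySem.List.pyGet? focus (-1), always some here since focus = state ++ [c].
def pvGo : List (List Int) → List (List Int) → List (Int × List (List Int))
  | _, [] => []
  | before, focus :: rest =>
      ((PySem.List.pyGet? focus (-1)).getD 0, focus :: (before ++ rest)) :: pvGo (before ++ [focus]) rest

def nondet_successors_alt (state : List Int) (n : Int) : List (Int × List (List Int)) :=
  let cells := ((PySem.List.pyRange 0 n 1).filter (fun c => !(state.contains c))).map (fun c => state ++ [c])
  pvGo [] cells

-- ===== PRECONDITION & SPEC =====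
def Spec_nondet_successors (state : List Int) (n : Int) (out : List (Int × List (List Int))) : Prop := out = nondet_successors_alt state n
instance (state : List Int) (n : Int) (out : List (Int × List (List Int))) : Decidable (Spec_nondet_successors state n out) := by unfold Spec_nondet_successors; infer_instance

-- ===== CLAIM (what is proved, stated in full; the proofs are below) =====
def Claim_equal_nondet_successors : Prop := ∀ (state : List Int) (n : Int), Dom_nondet_successors state n → Spec_nondet_successors state n (nondet_successors state n)

-- ===== LEMMAS AND PROOFS =====

-- 'for x in l: out.append(g x)' is map
theorem pv_foldl_append_map {α β : Type} (g : α → β) : ∀ (l : List α) (acc : List β),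
    l.foldl (fun s x => s ++ [g x]) acc = acc ++ l.map g := by
  intro l
  induction l with
  | nil => simp
  | cons a t ih => intro acc; simp [List.foldl_cons, ih]

-- for a duplicate-free concatenation, filtering out the focused element is dropping it
theorem pv_filter_ne_middle (pre : List Int) (col : Int) (rest : List Int)
    (h : (pre ++ col :: rest).Nodup) :
    (pre ++ col :: rest).filter (fun c => !(c == col)) = pre ++ rest := by
  have hcol : col ∉ pre ∧ col ∉ rest := by
    have h' := h
    simp only [List.nodup_append, List.nodup_cons] at h'
    tauto
  rw [List.filter_append, List.filter_cons]
  simp only [beq_self_eq_true, Bool.not_true, Bool.false_eq_true, if_false]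
  rw [List.filter_eq_self.mpr (fun c hc => by
        simpa using fun (h : c = col) => hcol.1 (h ▸ hc)),
      List.filter_eq_self.mpr (fun c hc => by
        simpa using fun (h : c = col) => hcol.2 (h ▸ hc))]

-- zipper invariant: pvGo on (map cell pre, map cell suf) emits A's blocks for the columns of suf
theorem pv_go_spec (state : List Int) : ∀ (suf pre : List Int), (pre ++ suf).Nodup →
    pvGo (pre.map (fun c => state ++ [c])) (suf.map (fun c => state ++ [c])) =
    suf.map (fun col => (col, (state ++ [col]) ::
      ((pre ++ suf).filter (fun c => !(c == col))).map (fun c => state ++ [c]))) := by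
  intro suf
  induction suf with
  | nil => intro pre _; simp [pvGo]
  | cons col rest ih =>
    intro pre hnd
    have hnd' : ((pre ++ [col]) ++ rest).Nodup := by
      simpa [List.append_assoc] using hnd
    have htail := ih (pre ++ [col]) hnd'
    simp only [List.map_cons, pvGo, PySem.List.pyGet?_neg_one_append_singleton, Option.getD_some,
      pv_filter_ne_middle pre col rest hnd, List.map_append]
    congr 1
    simp only [List.map_append, List.map_cons, List.map_nil, List.append_assoc,
      List.singleton_append] at htail ⊢
    exact htail

-- ===== VERDICT (by name: the statement is the Claim_ definition above) =====
theorem nondet_successors_spec : Claim_equal_nondet_successors := by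
  intro state n _
  unfold Spec_nondet_successors nondet_successors nondet_successors_alt
  set L := (PySem.List.pyRange 0 n 1).filter (fun c => !(state.contains c)) with hL
  have hnd : L.Nodup := List.Nodup.filter _ (PySem.List.nodup_pyRange_one 0 n)
  have hgo := pv_go_spec state L [] (by simpa using hnd)
  simp only [List.map_nil, List.nil_append] at hgo
  simp only [List.nil_append, pv_foldl_append_map, List.singleton_append, hgo]
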